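-- pv_equiv track=rewrite | github.com/daniel-reich/ubiquitous-fiesta | bHfb35MfsjyM6DJge_15.py | route_diff
-- ===== SOURCE A (Python) =====
-- def route_diff(directions):
--   l = directions.copy()
--   while 'N' in l and 'S' in l:
--     l.remove('N')
--     l.remove('S')
--   while 'E' in l and 'W' in l:
--     l.remove('E')
--     l.remove('W')
--   return len(directions) - len(l)
-- ===== SOURCE B (Python) =====
-- def route_diff(directions):
--   n = directions.count('N')
--   s = directions.count('S')
--   e = directions.count('E')
--   w = directions.count('W')
--   return 2 * min(n, s) + 2 * min(e, w)
-- ===== Notes on version B (the rewrite author's own statement) =====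
-- stated objective: simpler
-- what changed: Replaced the repeated membership-test-and-remove while loops with four single-pass counts and the closed form 2*min(N,S)+2*min(E,W).
import Mathlib
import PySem

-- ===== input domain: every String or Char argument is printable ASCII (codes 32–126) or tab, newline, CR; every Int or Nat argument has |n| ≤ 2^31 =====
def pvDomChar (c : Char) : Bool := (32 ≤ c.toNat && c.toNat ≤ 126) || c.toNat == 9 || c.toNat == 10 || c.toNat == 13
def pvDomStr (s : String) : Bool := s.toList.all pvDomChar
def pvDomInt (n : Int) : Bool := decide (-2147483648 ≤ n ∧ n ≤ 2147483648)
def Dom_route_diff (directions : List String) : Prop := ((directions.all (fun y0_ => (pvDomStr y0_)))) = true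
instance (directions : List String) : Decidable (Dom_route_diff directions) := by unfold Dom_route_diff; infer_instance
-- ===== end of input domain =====

-- B replaces A's remove-while-present loops by four counts and the closed form 2*min(N,S)+2*min(E,W) (simpler).


-- ===== PORT A =====
-- 'while a in l and b in l: l.remove(a); l.remove(b)'.  Both elements are present in the
-- guard, so Python's list.remove is exactly List.erase of the first occurrence (PySem:
-- remove?_eq_some_erase); it never raises here.
def pvPairLoop (a b : String) (l : List String) : List String :=
  if a ∈ l ∧ b ∈ l then pvPairLoop a b ((l.erase a).erase b) else l
termination_by l.length
decreasing_by
  rename_i h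
  have h1 : (l.erase a).length + 1 = l.length := List.length_erase_add_one h.1
  have h2 : ((l.erase a).erase b).length ≤ (l.erase a).length := List.length_erase_le
  omega

def route_diff (directions : List String) : Int :=
  -- l = directions.copy(); two while loops; return len(directions) - len(l)
  (directions.length : Int) -
    ((pvPairLoop "E" "W" (pvPairLoop "N" "S" directions)).length : Int)

-- ===== PORT B =====
def route_diff_alt (directions : List String) : Int :=
  let n : Int := PySem.List.count directions "N"
  let s : Int := PySem.List.count directions "S"
  let e : Int := PySem.List.count directions "E"
  let w : Int := PySem.List.count directions "W"
  2 * min n s + 2 * min e w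

-- ===== PRECONDITION & SPEC =====
def Spec_route_diff (directions : List String) (out : Int) : Prop := out = route_diff_alt directions
instance (directions : List String) (out : Int) : Decidable (Spec_route_diff directions out) := by unfold Spec_route_diff; infer_instance

-- ===== CLAIM (what is proved, stated in full; the proofs are below) =====
def Claim_equal_route_diff : Prop := ∀ (directions : List String), Dom_route_diff directions → Spec_route_diff directions (route_diff directions)

-- ===== LEMMAS AND PROOFS =====

-- The pair loop removes exactly 2*min(count a, count b) elements.
theorem pvPairLoop_length (a b : String) (hab : a ≠ b) (l : List String) :
    (pvPairLoop a b l).length + 2 * min (l.count a) (l.count b) = l.length := by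
  fun_induction pvPairLoop a b l with
  | case1 l h ih =>
    have ha : 0 < l.count a := List.count_pos_iff.mpr h.1
    have hb : 0 < l.count b := List.count_pos_iff.mpr h.2
    have hca : ((l.erase a).erase b).count a = l.count a - 1 := by
      rw [List.count_erase_of_ne hab, List.count_erase_self]
    have hcb : ((l.erase a).erase b).count b = l.count b - 1 := by
      rw [List.count_erase_self, List.count_erase_of_ne (fun hbe => hab hbe.symm)]
    have hla : (l.erase a).length + 1 = l.length := List.length_erase_add_one h.1
    have hbmem : b ∈ l.erase a := (List.mem_erase_of_ne (fun hbe => hab hbe.symm)).mpr h.2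
    have hlb : ((l.erase a).erase b).length + 1 = (l.erase a).length :=
      List.length_erase_add_one hbmem
    rw [hca, hcb] at ih
    have hl1 : 0 < l.length := lt_of_lt_of_le ha (List.count_le_length)
    omega
  | case2 l h =>
    rcases not_and_or.mp h with h' | h'
    · have : l.count a = 0 := List.count_eq_zero.mpr h'
      simp [this]
    · have : l.count b = 0 := List.count_eq_zero.mpr h'
      simp [this]

-- The pair loop does not change the count of any other value.
theorem pvPairLoop_count (a b c : String) (hca : c ≠ a) (hcb : c ≠ b) (l : List String) :
    (pvPairLoop a b l).count c = l.count c := by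
  fun_induction pvPairLoop a b l with
  | case1 l h ih =>
    rw [ih, List.count_erase_of_ne hcb, List.count_erase_of_ne hca]
  | case2 l h => rfl

-- ===== VERDICT (by name: the statement is the Claim_ definition above) =====
theorem route_diff_spec : Claim_equal_route_diff := by
  intro l _
  unfold Spec_route_diff route_diff route_diff_alt
  have h1 := pvPairLoop_length "N" "S" (by decide) l
  have h2 := pvPairLoop_length "E" "W" (by decide) (pvPairLoop "N" "S" l)
  have hE := pvPairLoop_count "N" "S" "E" (by decide) (by decide) l
  have hW := pvPairLoop_count "N" "S" "W" (by decide) (by decide) l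
  rw [hE, hW] at h2
  simp only [PySem.List.count_eq]
  omega
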